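-- pv_equiv track=rewrite | github.com/IdrisTheDragon/Advent2023 | day-01/day1.py | finder_left
-- ===== SOURCE A (Python) =====
-- digits = {'one':1, 'two':2, 'three':3, 'four':4, 'five':5, 'six':6, 'seven':7, 'eight':8, 'nine':9}
--
-- def finder_left(l):
--     i=len(l)-1
--     while i >= 0:
--         if l[i].isdigit():
--             return l[i]
--         for k,v in digits.items():
--             if l[i:].startswith(k):
--                 return str(v)
--         i -=1
--     raise Error("missing digit")
-- ===== SOURCE B (Python) =====
-- digits = {'one':1, 'two':2, 'three':3, 'four':4, 'five':5, 'six':6, 'seven':7, 'eight':8, 'nine':9}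
--
-- def finder_left(l):
--     # single forward pass keeping the LAST (rightmost) match, instead of
--     # scanning from the right with an early return
--     last = None
--     for i, c in enumerate(l):
--         if c.isdigit():
--             last = c
--         else:
--             for k, v in digits.items():
--                 if l.startswith(k, i):
--                     last = str(v)
--                     break
--     if last is None:
--         raise Error("missing digit")
--     return last
-- ===== Notes on version B (the rewrite author's own statement) =====
-- stated objective: alternative
-- what changed: B replaces A's right-to-left while-loop with early return by a single left-to-right pass that keeps the last (rightmost) match in an accumulator; Pre_ excludes inputs with no digit and no spelled digit, on which both A and B raise NameError ('Error' is undefined).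
-- outside the precondition, e.g. on finder_left('abc'): A raises NameError, B raises NameError
import Mathlib
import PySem

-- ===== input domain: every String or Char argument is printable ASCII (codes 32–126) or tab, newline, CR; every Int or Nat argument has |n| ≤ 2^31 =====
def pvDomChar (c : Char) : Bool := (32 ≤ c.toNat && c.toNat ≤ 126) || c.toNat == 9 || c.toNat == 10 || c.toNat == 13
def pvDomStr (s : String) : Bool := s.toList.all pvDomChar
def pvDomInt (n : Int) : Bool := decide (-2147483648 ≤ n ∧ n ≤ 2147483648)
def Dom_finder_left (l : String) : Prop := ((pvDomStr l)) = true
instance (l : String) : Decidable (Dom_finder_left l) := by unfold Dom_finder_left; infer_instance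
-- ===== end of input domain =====

-- B replaces A's right-to-left scan with early return by one forward pass keeping the last match (alternative traversal, same cost).
-- Both Pythons raise NameError when the string contains no digit and no spelled-out digit; Pre_ excludes exactly those inputs.

-- the digits dict (shared module-level constant of both Pythons), in insertion order
def pvDigits : List (String × Int) :=
  [("one",1),("two",2),("three",3),("four",4),("five",5),("six",6),("seven",7),("eight",8),("nine",9)]

-- inner 'for k,v in digits.items(): if <s>.startswith(k): …' loop (identical in A and B)
def pvWordScan (s : List Char) : List (String × Int) → Option String
  | [] => none
  | kv :: rest =>
    if PySem.Chars.startswith s kv.1.toList then some (PySem.Int.toStr kv.2)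
    else pvWordScan s rest

-- ===== PORT A =====
-- A's while loop, i counting down from len(l)-1 to 0 (argument is i+1; 0 = loop exhausted)
def pvLoopA (cs : List Char) : Nat → Option String
  | 0 => none
  | i+1 =>
    match cs.drop i with
    | [] => pvLoopA cs i   -- unreachable: i < cs.length at every call
    | c :: _ =>
      if PySem.Chars.isdigit c then some (String.ofList [c])
      else
        match pvWordScan (cs.drop i) pvDigits with
        | some r => some r
        | none => pvLoopA cs i

def finder_left (l : String) : String :=
  match pvLoopA l.toList l.toList.length with
  | some r => r
  | none => ""   -- Python raises NameError here ('Error' undefined); excluded by Pre_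

-- ===== PORT B =====
-- body of B's 'for i, c in enumerate(l)' loop: acc ↦ updated acc
def pvStepB (cs : List Char) (acc : Option String) (p : Int × Char) : Option String :=
  if PySem.Chars.isdigit p.2 then some (String.ofList [p.2])
  else
    match pvWordScan (cs.drop p.1.toNat) pvDigits with
    | some r => some r
    | none => acc

def finder_left_alt (l : String) : String :=
  match (PySem.List.enumerate l.toList 0).foldl (pvStepB l.toList) none with
  | some r => r
  | none => ""   -- Python raises NameError here ('Error' undefined); excluded by Pre_

-- ===== PRECONDITION & SPEC =====
-- Pre_ excludes exactly the inputs with no digit character and no spelled-out digit,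
-- on which Python A (and Python B) raises NameError (the raise statement references an undefined name).
def Pre_finder_left (l : String) : Prop :=
  (l.toList.any PySem.Chars.isdigit = true) ∨
  ((["one","two","three","four","five","six","seven","eight","nine"].any
      (fun w => PySem.Chars.isIn w.toList l.toList)) = true)
instance (l : String) : Decidable (Pre_finder_left l) := by unfold Pre_finder_left; infer_instance

def pvWitness_finder_left : String := "x3one"

def Spec_finder_left (l : String) (out : String) : Prop := out = finder_left_alt l
instance (l : String) (out : String) : Decidable (Spec_finder_left l out) := by unfold Spec_finder_left; infer_instance

-- ===== CLAIM (what is proved, stated in full; the proofs are below) =====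
def Claim_equal_finder_left : Prop := ∀ (l : String), Dom_finder_left l → Pre_finder_left l → Spec_finder_left l (finder_left l)

-- ===== LEMMAS AND PROOFS =====

-- per-position match (the value decided at position i, common skeleton of both loops)
def pvAt (cs : List Char) (i : Nat) : Option String :=
  match cs.drop i with
  | [] => none
  | c :: _ => if PySem.Chars.isdigit c then some (String.ofList [c]) else pvWordScan (cs.drop i) pvDigits

theorem findSome?_congr_mem {ι β : Type} {l : List ι} {f g : ι → Option β}
    (h : ∀ x ∈ l, f x = g x) : l.findSome? f = l.findSome? g := by
  induction l with
  | nil => rfl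
  | cons x xs ih =>
    simp only [List.findSome?_cons, h x (by simp)]
    cases g x with
    | some r => rfl
    | none => exact ih (fun y hy => h y (by simp [hy]))

theorem pvLoopA_eq (cs : List Char) (n : Nat) :
    pvLoopA cs n = (List.range n).reverse.findSome? (pvAt cs) := by
  induction n with
  | zero => rfl
  | succ i ih =>
    rw [List.range_succ, List.reverse_append, List.reverse_singleton]
    simp only [List.singleton_append, List.findSome?_cons]
    unfold pvLoopA pvAt
    cases h : cs.drop i with
    | nil => simpa using ih
    | cons c t =>
      by_cases hd : PySem.Chars.isdigit c
      · simp [hd]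
      · simp only [hd]
        cases hw : pvWordScan (c :: t) pvDigits with
        | some r => simp
        | none => simpa [hw] using ih

theorem foldl_lastMatch {ι β : Type} (gg : ι → Option β) :
    ∀ (l : List ι) (acc : Option β),
      l.foldl (fun a x => (gg x).elim a some) acc
        = (l.reverse.findSome? gg).elim acc some := by
  intro l
  induction l with
  | nil => intro acc; rfl
  | cons x xs ih =>
    intro acc
    rw [List.foldl_cons, ih, List.reverse_cons, List.findSome?_append]
    cases hxs : xs.reverse.findSome? gg with
    | some r => simp
    | none =>
      cases hgx : gg x <;> simp [hgx]

theorem stepB_eq (cs : List Char) (acc : Option String) (p : Int × Char) :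
    pvStepB cs acc p
      = (if PySem.Chars.isdigit p.2 then some (String.ofList [p.2])
         else pvWordScan (cs.drop p.1.toNat) pvDigits).elim acc some := by
  unfold pvStepB
  by_cases hd : PySem.Chars.isdigit p.2
  · simp [hd]
  · simp only [hd]
    cases pvWordScan (cs.drop p.1.toNat) pvDigits <;> rfl

theorem altFold_eq (cs : List Char) :
    (PySem.List.enumerate cs 0).foldl (pvStepB cs) none
      = (List.range cs.length).reverse.findSome? (pvAt cs) := by
  have h1 : (PySem.List.enumerate cs 0).foldl (pvStepB cs) none
      = (PySem.List.enumerate cs 0).foldl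
          (fun a p => (if PySem.Chars.isdigit p.2 then some (String.ofList [p.2])
                       else pvWordScan (cs.drop p.1.toNat) pvDigits).elim a some) none := by
    apply PySem.List.foldl_congr_mem
    intro acc p _
    exact stepB_eq cs acc p
  rw [h1, foldl_lastMatch (fun p : Int × Char =>
        if PySem.Chars.isdigit p.2 then some (String.ofList [p.2])
        else pvWordScan (cs.drop p.1.toNat) pvDigits) (PySem.List.enumerate cs) none]
  have h2 : (PySem.List.enumerate cs 0).reverse.findSome?
        (fun p => if PySem.Chars.isdigit p.2 then some (String.ofList [p.2])
                  else pvWordScan (cs.drop p.1.toNat) pvDigits)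
      = (List.range cs.length).reverse.findSome? (pvAt cs) := by
    rw [PySem.List.enumerate_eq_map_pyRange cs ' ', PySem.List.pyRange_one]
    simp only [Int.sub_zero, ← List.map_reverse, List.findSome?_map]
    apply findSome?_congr_mem
    intro k hk
    have hklt : k < cs.length := by
      have := List.mem_reverse.mp hk
      simpa using List.mem_range.mp this
    have hget : PySem.List.pyGetD cs ((k : Int)) ' ' = cs[k] := by
      rw [PySem.List.pyGetD_natCast]
      simp [hklt, List.getD_eq_getElem?_getD]
    have hdrop : cs.drop k = cs[k] :: cs.drop (k + 1) := List.drop_eq_getElem_cons hklt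
    simp only [Function.comp]
    unfold pvAt
    rw [hdrop]
    simp only [Int.zero_add, Int.toNat_natCast, hget]
    rw [hdrop]
  rw [h2]
  cases (List.range cs.length).reverse.findSome? (pvAt cs) <;> rfl

-- ===== VERDICT (by name: the statement is the Claim_ definition above) =====
theorem finder_left_spec : Claim_equal_finder_left := by
  intro l _ _
  unfold Spec_finder_left finder_left finder_left_alt
  rw [pvLoopA_eq, altFold_eq]
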